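-- pv_equiv track=rewrite | github.com/manas-17045/LeetcodeSolutions | Leetcode 3501-3600/3556/3556_2.py | sumOfLargestPrimes
-- ===== SOURCE A (Python) =====
-- def sumOfLargestPrimes(s: str) -> int:
--     """
--     Finds all prime numbers that can be formed by taking substrings of the input string `s`
--     and returns the sum of the three largest such prime numbers.
--
--     Args:
--         s: A string consisting of digits.
--
--     Returns:
--         The sum of the three largest prime numbers formed by substrings of `s`. If there are fewer than three such primes, it sums all of them. If there are no such primes, it returns 0.
--     """
--     # Deterministic Miller-Rabin for n < 2^64
--     def isPrime(n: int) -> bool: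
--         if n < 2:
--             return False
--         # Small prime shortcuts
--         for p in (2, 3, 5, 7, 11, 13, 17, 19, 23, 29):
--             if n % p == 0:
--                 return n == p
--         # Write n - 1 = d * 2^s
--         d, s2 = n - 1, 0
--         while d & 1 == 0:
--             d >>= 1
--             s2 += 1
--         # Base valid for testing up to 2^64
--         for a in (2, 325, 9375, 28178, 450775, 9780504, 1795265022):
--             if a % 2 == 0:
--                 continue
--             x = pow(a, d, n)
--             if x == 1 or x == n - 1:
--                 continue
--             for _ in range(s2 - 1):
--                 x = (x * x) % n
--                 if x == n - 1:
--                     break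
--             else:
--                 return False
--         return True
--
--     n = len(s)
--     primes = set()
--     # Generate all substrings, convert to int (leading zeros dropped automatically).
--     for i in range(n):
--         num = 0
--         for j in range(i, n):
--             # Build number on the fly to avoid slicing
--             num = num * 10 + (ord(s[j]) - ord('0'))
--             # Only check if >= 2
--             if num >= 2 and isPrime(num):
--                 primes.add(num)
--
--     # Sum up the 3 largest
--     if not primes:
--         return 0
--     # Get three largest without fully sorting if very large set
--     # But, here set size <= 55, so sort is fine
--     top3 = sorted(primes, reverse=True)[:3]
--     return sum(top3)
-- ===== SOURCE B (Python) =====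
-- def sumOfLargestPrimes(s: str) -> int:
--     """Sum of the three largest distinct primes among the substring values of s.
--
--     Recurses over suffixes and streams each candidate into a running top-3
--     list via a bounded insertion, so no prime set and no final sort are kept.
--     """
--     # Deterministic Miller-Rabin for n < 2^64 (shared helper, kept as is)
--     def isPrime(n: int) -> bool:
--         if n < 2:
--             return False
--         # Small prime shortcuts
--         for p in (2, 3, 5, 7, 11, 13, 17, 19, 23, 29):
--             if n % p == 0:
--                 return n == p
--         # Write n - 1 = d * 2^s
--         d, s2 = n - 1, 0
--         while d & 1 == 0:
--             d >>= 1
--             s2 += 1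
--         # Base valid for testing up to 2^64
--         for a in (2, 325, 9375, 28178, 450775, 9780504, 1795265022):
--             if a % 2 == 0:
--                 continue
--             x = pow(a, d, n)
--             if x == 1 or x == n - 1:
--                 continue
--             for _ in range(s2 - 1):
--                 x = (x * x) % n
--                 if x == n - 1:
--                     break
--             else:
--                 return False
--         return True
--
--     def place(t, v):
--         # insert v into the descending list t, keep the three largest
--         if not t:
--             return [v]
--         if v > t[0]:
--             return ([v] + t)[:3]
--         return [t[0]] + place(t[1:], v)[:2]
--
--     top3 = []
--     suffix = s
--     while suffix:
--         num = 0
--         for c in suffix: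
--             num = num * 10 + (ord(c) - 48)
--             if num >= 2 and num not in top3 and isPrime(num):
--                 top3 = place(top3, num)
--         suffix = suffix[1:]
--     return sum(top3)
-- ===== Notes on version B (the rewrite author's own statement) =====
-- stated objective: alternative
-- what changed: B keeps the Miller-Rabin primality helper but replaces A's prime-set accumulation plus full descending sort and slice with a streaming top-3 list maintained by a bounded recursive insertion (deduplicating by membership in the current top-3), recursing over suffixes instead of index ranges.
import Mathlib
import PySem

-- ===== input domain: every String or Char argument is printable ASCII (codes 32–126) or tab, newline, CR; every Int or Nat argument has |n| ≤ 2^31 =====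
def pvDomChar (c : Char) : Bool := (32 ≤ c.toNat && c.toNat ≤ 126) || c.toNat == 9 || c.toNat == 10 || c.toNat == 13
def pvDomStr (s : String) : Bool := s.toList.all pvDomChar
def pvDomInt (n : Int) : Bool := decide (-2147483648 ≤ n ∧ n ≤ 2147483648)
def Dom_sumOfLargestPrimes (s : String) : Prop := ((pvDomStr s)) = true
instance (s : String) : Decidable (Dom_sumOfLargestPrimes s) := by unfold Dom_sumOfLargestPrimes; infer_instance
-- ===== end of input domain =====

-- B keeps the Miller-Rabin primality helper (shared below) but replaces A's prime set +
-- descending sort + take-3 by a running top-3 list maintained by a bounded recursive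
-- insertion over a recursion on suffixes; alternative formulation, same cost.

-- ===== SHARED HELPER: the Miller-Rabin isPrime both Pythons contain verbatim =====

-- port of Python's built-in three-argument pow(b, e, m) (m > 0 here): binary
-- exponentiation reducing mod m at each step; exact for the nonnegative b, e used here
def pvPowMod (b : Int) (e : Nat) (m : Int) : Int :=
  if e = 0 then PySem.Int.mod 1 m
  else
    let r := pvPowMod b (e / 2) m
    let r2 := PySem.Int.mod (r * r) m
    if e % 2 = 1 then PySem.Int.mod (r2 * b) m else r2

-- for p in (2,...,29): if n % p == 0: return n == p   (first-divisor scan; none = fell through)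
def pvSmall (nn : Int) : List Int → Option Bool
  | [] => none
  | p :: ps => if PySem.Int.mod nn p == 0 then some (nn == p) else pvSmall nn ps

-- while d & 1 == 0: d >>= 1; s2 += 1   (0 < d is a totality guard only; d = n-1 ≥ 1 at call site)
def pvFactor (d : Int) (s2 : Nat) : Int × Nat :=
  if 0 < d ∧ PySem.Int.band d 1 == 0 then pvFactor (d >>> (1 : Nat)) (s2 + 1) else (d, s2)
  termination_by d.toNat
  decreasing_by
    rename_i h
    rw [Int.shiftRight_eq_div_pow]
    omega

-- for _ in range(s2-1): x = x*x % n; if x == n-1: break / else: return False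
def pvSqLoop (nn : Int) (x : Int) : Nat → Bool
  | 0 => false
  | k + 1 =>
    let x' := PySem.Int.mod (x * x) nn
    if x' == nn - 1 then true else pvSqLoop nn x' k

-- for a in bases: if a % 2 == 0: continue; x = pow(a, d, n); ...
-- (pow(a, d, n): d = n-1 after halving, always ≥ 0, so powMod with d.toNat is exact here)
def pvBases (nn d : Int) (s2 : Nat) : List Int → Bool
  | [] => true
  | a :: rest =>
    if PySem.Int.mod a 2 == 0 then pvBases nn d s2 rest
    else
      let x := pvPowMod a d.toNat nn
      if x == 1 || x == nn - 1 then pvBases nn d s2 rest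
      else if pvSqLoop nn x (s2 - 1) then pvBases nn d s2 rest
      else false

def pvIsPrime (nn : Int) : Bool :=
  if nn < 2 then false
  else
    match pvSmall nn [2, 3, 5, 7, 11, 13, 17, 19, 23, 29] with
    | some b => b
    | none =>
      let ds := pvFactor (nn - 1) 0
      pvBases nn ds.1 ds.2 [2, 325, 9375, 28178, 450775, 9780504, 1795265022]

-- ===== PORT A =====

-- body of A's inner loop: num = num*10 + (ord(s[j]) - ord('0')); if num >= 2 and isPrime(num): primes.add(num)
def pvCharA (st : Int × PySem.Set Int) (c : Char) : Int × PySem.Set Int :=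
  let num := st.1 * 10 + ((c.toNat : Int) - 48)
  (num, if decide (num ≥ 2) && pvIsPrime num then PySem.Set.add st.2 num else st.2)

def sumOfLargestPrimes (s : String) : Int :=
  let cs := s.toList
  let n : Int := (cs.length : Int)
  let primes : PySem.Set Int :=
    (PySem.List.pyRange 0 n).foldl
      (fun P i =>
        ((PySem.List.pyRange i n).foldl
          (fun (st : Int × PySem.Set Int) j => pvCharA st (PySem.List.pyGetD cs j '0'))
          (0, P)).2)
      PySem.Set.empty
  if primes.isEmpty then 0
  else (PySem.List.slice (PySem.List.sorted primes (fun x => x) true) none (some 3)).sum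

-- ===== PORT B =====

-- insert v into the descending list t, keep the three largest
def pvPlace (t : List Int) (v : Int) : List Int :=
  match t with
  | [] => [v]
  | h :: r => if v > h then (v :: h :: r).take 3 else h :: (pvPlace r v).take 2

-- for c in suffix: num = num*10 + (ord(c)-48); if ...: top3 = place(top3, num)
def pvInnerB (t : List Int) (num : Int) : List Char → Int × List Int
  | [] => (num, t)
  | c :: rest =>
    let num' := num * 10 + ((c.toNat : Int) - 48)
    let t' := if decide (num' ≥ 2) && !t.contains num' && pvIsPrime num' then pvPlace t num' else t
    pvInnerB t' num' rest

-- while suffix: (inner loop); suffix = suffix[1:]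
def pvOuterB (t : List Int) : List Char → List Int
  | [] => t
  | c :: rest => pvOuterB (pvInnerB t 0 (c :: rest)).2 rest

def sumOfLargestPrimes_alt (s : String) : Int := (pvOuterB [] s.toList).sum

-- ===== PRECONDITION & SPEC =====
def Spec_sumOfLargestPrimes (s : String) (out : Int) : Prop := out = sumOfLargestPrimes_alt s
instance (s : String) (out : Int) : Decidable (Spec_sumOfLargestPrimes s out) := by unfold Spec_sumOfLargestPrimes; infer_instance

-- ===== CLAIM (what is proved, stated in full; the proofs are below) =====
def Claim_equal_sumOfLargestPrimes : Prop := ∀ (s : String), Dom_sumOfLargestPrimes s → Spec_sumOfLargestPrimes s (sumOfLargestPrimes s)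

-- ===== LEMMAS AND PROOFS =====

-- full descending insertion (proof-side model of pvPlace without the truncation)
def pvInsD (v : Int) : List Int → List Int
  | [] => [v]
  | h :: r => if v > h then v :: h :: r else h :: pvInsD v r

def pvSortD (P : List Int) : List Int := PySem.List.sorted P (fun x => x) true

theorem pvPlace_eq_take (v : Int) : ∀ (t : List Int), pvPlace t v = (pvInsD v t).take 3 := by
  intro t
  induction t with
  | nil => rfl
  | cons h r IH =>
    simp only [pvPlace, pvInsD]
    split
    · rfl
    · rw [IH]
      simp [List.take_take]

theorem pvInsD_mem (v x : Int) : ∀ (l : List Int), x ∈ pvInsD v l ↔ x = v ∨ x ∈ l := by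
  intro l
  induction l with
  | nil => simp [pvInsD]
  | cons h r IH =>
    simp only [pvInsD]
    split
    · simp
    · simp [IH]; tauto

theorem pvInsD_perm (v : Int) : ∀ (l : List Int), (pvInsD v l).Perm (v :: l) := by
  intro l
  induction l with
  | nil => simp [pvInsD]
  | cons h r IH =>
    simp only [pvInsD]
    split
    · exact List.Perm.refl _
    · exact (IH.cons h).trans (List.Perm.swap v h r)

theorem pvInsD_pairwise (v : Int) : ∀ (l : List Int),
    List.Pairwise (fun a b => b < a) l → v ∉ l →
    List.Pairwise (fun a b => b < a) (pvInsD v l) := by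
  intro l
  induction l with
  | nil => intro _ _; simp [pvInsD]
  | cons h r IH =>
    intro hp hv
    rw [List.pairwise_cons] at hp
    simp only [List.mem_cons, not_or] at hv
    simp only [pvInsD]
    split
    · rename_i hgt
      rw [List.pairwise_cons]
      refine ⟨?_, List.pairwise_cons.mpr hp⟩
      intro x hx
      rcases List.mem_cons.mp hx with rfl | hx
      · exact hgt
      · exact (hp.1 x hx).trans hgt
    · rename_i hng
      rw [List.pairwise_cons]
      refine ⟨?_, IH hp.2 hv.2⟩
      intro x hx
      rcases (pvInsD_mem v x r).mp hx with rfl | hx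
      · exact lt_of_le_of_ne (not_lt.mp hng) hv.1
      · exact hp.1 x hx

theorem pvInsD_of_forall_lt (v : Int) : ∀ (l : List Int),
    (∀ x ∈ l, v < x) → pvInsD v l = l ++ [v] := by
  intro l
  induction l with
  | nil => intro _; rfl
  | cons h r IH =>
    intro hall
    simp only [pvInsD]
    rw [if_neg (by exact not_lt.mpr (le_of_lt (hall h (by simp))))]
    rw [IH (fun x hx => hall x (by simp [hx]))]
    simp

theorem pvTake_insD (v : Int) : ∀ (l : List Int) (n : Nat),
    ((pvInsD v (l.take n)).take n) = (pvInsD v l).take n := by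
  intro l
  induction l with
  | nil => intro n; simp
  | cons h r IH =>
    intro n
    cases n with
    | zero => simp
    | succ m =>
      simp only [List.take_succ_cons, pvInsD]
      split
      · cases m with
        | zero => simp
        | succ k =>
          simp only [List.take_succ_cons, List.take_take]
          rw [Nat.min_eq_left (Nat.le_succ k)]
      · rw [List.take_succ_cons, List.take_succ_cons, IH m]

theorem pvSortD_pairwise (P : List Int) (h : P.Nodup) :
    List.Pairwise (fun a b => b < a) (pvSortD P) := by
  have hnd : (pvSortD P).Nodup := (PySem.List.sorted_perm P (fun x => x) true).nodup_iff.mpr h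
  have hpw := PySem.List.sorted_pairwise_rev P (fun x => x)
  exact (hpw.and hnd).imp (fun hab => lt_of_le_of_ne hab.1 hab.2.symm)

theorem pvSortD_append_new (P : List Int) (v : Int) (hnd : P.Nodup) (hv : v ∉ P) :
    pvSortD (P ++ [v]) = pvInsD v (pvSortD P) := by
  apply PySem.List.sorted_rev_eq_of_perm_of_pairwise_gt
  · exact (pvInsD_perm v _).trans
      (((PySem.List.sorted_perm P (fun x => x) true).cons v).trans (List.perm_append_singleton v P).symm)
  · exact pvInsD_pairwise v _ (pvSortD_pairwise P hnd)
      (fun hm => hv ((PySem.List.mem_sorted P (fun x => x) true v).mp hm))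

-- one candidate value: A's set update vs B's top-3 update
theorem pvStep (P : List Int) (t : List Int) (v : Int)
    (hnd : P.Nodup) (ht : t = (pvSortD P).take 3) :
    (if decide (v ≥ 2) && pvIsPrime v then PySem.Set.add P v else P).Nodup ∧
    (if decide (v ≥ 2) && !t.contains v && pvIsPrime v then pvPlace t v else t) =
      (pvSortD (if decide (v ≥ 2) && pvIsPrime v then PySem.Set.add P v else P)).take 3 := by
  cases hA : decide (v ≥ 2) with
  | false => simpa [hA, hnd] using ht
  | true =>
  cases hP : pvIsPrime v with
  | false => simpa [hA, hP, hnd] using ht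
  | true =>
  simp only [Bool.true_and, Bool.and_true, reduceIte]
  by_cases hvP : v ∈ P
  · have hadd : PySem.Set.add P v = P := by simp [PySem.Set.add, hvP]
    rw [hadd]
    refine ⟨hnd, ?_⟩
    by_cases hvt : v ∈ t
    · simpa [hvt] using ht
    · rw [if_pos (show (!t.contains v) = true by simp [hvt])]
      have hvL : v ∈ pvSortD P := (PySem.List.mem_sorted P (fun x => x) true v).mpr hvP
      have hvd : v ∈ (pvSortD P).drop 3 := by
        rcases List.mem_append.mp ((List.take_append_drop 3 (pvSortD P)) ▸ hvL) with h | h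
        · exact absurd (ht ▸ h) hvt
        · exact h
      have hlen : 3 < (pvSortD P).length := by
        have hne := List.ne_nil_of_mem hvd
        by_contra hle
        exact hne (List.drop_eq_nil_of_le (by omega))
      have hall : ∀ x ∈ t, v < x := by
        intro x hx
        have hpw := pvSortD_pairwise P hnd
        rw [← List.take_append_drop 3 (pvSortD P)] at hpw
        exact (List.pairwise_append.mp hpw).2.2 x (ht ▸ hx) v hvd
      rw [pvPlace_eq_take, pvInsD_of_forall_lt v t hall, ht,
        List.take_append_of_le_length (by simp; omega)]
      simp [List.take_take]
  · have hadd : PySem.Set.add P v = P ++ [v] := by simp [PySem.Set.add, hvP]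
    rw [hadd]
    refine ⟨by simp [List.nodup_append, hnd]; exact fun a ha hav => hvP (by rwa [← hav]), ?_⟩
    have hvt : v ∉ t := fun h =>
      hvP ((PySem.List.mem_sorted P (fun x => x) true v).mp (List.mem_of_mem_take (ht ▸ h)))
    rw [if_pos (show (!t.contains v) = true by simp [hvt])]
    rw [pvPlace_eq_take, ht, pvTake_insD v (pvSortD P) 3, ← pvSortD_append_new P v hnd hvP]

-- the inner (one-suffix) loop
theorem pvInner (cs : List Char) : ∀ (num : Int) (P t : List Int),
    P.Nodup → t = (pvSortD P).take 3 →
    (pvInnerB t num cs).1 = (cs.foldl pvCharA (num, P)).1 ∧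
    (cs.foldl pvCharA (num, P)).2.Nodup ∧
    (pvInnerB t num cs).2 = (pvSortD (cs.foldl pvCharA (num, P)).2).take 3 := by
  induction cs with
  | nil => intro num P t hnd ht; exact ⟨rfl, hnd, by simpa [pvInnerB] using ht⟩
  | cons c r IH =>
    intro num P t hnd ht
    simp only [pvInnerB, List.foldl_cons, pvCharA]
    exact IH _ _ _ (pvStep P t _ hnd ht).1 (pvStep P t _ hnd ht).2

-- the outer loop: A's fold over start positions vs B's recursion on suffixes
theorem pvOuter (cs : List Char) : ∀ (P t : List Int),
    P.Nodup → t = (pvSortD P).take 3 →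
    pvOuterB t cs =
      (pvSortD ((List.range cs.length).foldl
        (fun P k => ((cs.drop k).foldl pvCharA (0, P)).2) P)).take 3 := by
  induction cs with
  | nil => intro P t _ ht; simpa [pvOuterB] using ht
  | cons c r IH =>
    intro P t hnd ht
    simp only [pvOuterB]
    have h1 := pvInner (c :: r) 0 P t hnd ht
    rw [List.length_cons, List.range_succ_eq_map, List.foldl_cons, List.foldl_map]
    simp only [List.drop_zero, List.drop_succ_cons]
    exact IH _ _ h1.2.1 h1.2.2

theorem sumOfLargestPrimes_spec' (s : String) : sumOfLargestPrimes s = sumOfLargestPrimes_alt s := by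
  simp only [sumOfLargestPrimes, sumOfLargestPrimes_alt]
  have hinner : (PySem.List.pyRange 0 ((s.toList.length : Nat) : Int)).foldl
      (fun P i => ((PySem.List.pyRange i ((s.toList.length : Nat) : Int)).foldl
        (fun (st : Int × PySem.Set Int) j => pvCharA st (PySem.List.pyGetD s.toList j '0'))
        (0, P)).2) PySem.Set.empty =
      (PySem.List.pyRange 0 ((s.toList.length : Nat) : Int)).foldl
      (fun P i => ((s.toList.drop i.toNat).foldl pvCharA (0, P)).2) PySem.Set.empty := by
    apply PySem.List.foldl_congr_mem
    intro P i hi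
    rw [show ((s.toList.length : Nat) : Int) = PySem.List.len s.toList from rfl,
      PySem.List.foldl_pyRange_pyGetD s.toList '0' pvCharA (0, P)
        (PySem.List.mem_pyRange_one.mp hi).1]
  rw [hinner, PySem.List.pyRange_zero_natCast, List.foldl_map]
  simp only [Int.toNat_natCast]
  rw [pvOuter s.toList PySem.Set.empty [] List.nodup_nil rfl]
  by_cases hE : (List.range s.toList.length).foldl
      (fun P k => ((s.toList.drop k).foldl pvCharA (0, P)).2) PySem.Set.empty = []
  · rw [hE]
    rfl
  · rw [if_neg (by simpa [List.isEmpty_iff] using hE)]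
    rw [PySem.List.slice_to _ (by norm_num : (0:Int) ≤ 3)]
    rfl

-- ===== VERDICT (by name: the statement is the Claim_ definition above) =====
theorem sumOfLargestPrimes_spec : Claim_equal_sumOfLargestPrimes := by
  intro s _
  unfold Spec_sumOfLargestPrimes
  exact sumOfLargestPrimes_spec' s
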